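-- pv_equiv track=rewrite | github.com/RakRock/OnePercentBetter | state_map_data.py | get_state_key
-- ===== SOURCE A (Python) =====
-- STATE_KEY_MAP: dict[str, str] = {
--     # ── 28 States ──
--     "Andhra Pradesh":       "andhra_pradesh",
--     "Arunachal Pradesh":    "arunachal_pradesh",
--     "Assam":                "assam",
--     "Bihar":                "bihar",
--     "Chhattisgarh":         "chhattisgarh",
--     "Goa":                  "goa",
--     "Gujarat":              "gujarat",
--     "Haryana":              "haryana",
--     "Himachal Pradesh":     "himachal_pradesh",
--     "Jharkhand":            "jharkhand",
--     "Karnataka":            "karnataka",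
--     "Kerala":               "kerala",
--     "Madhya Pradesh":       "madhya_pradesh",
--     "Maharashtra":          "maharashtra",
--     "Manipur":              "manipur",
--     "Meghalaya":            "meghalaya",
--     "Mizoram":              "mizoram",
--     "Nagaland":             "nagaland",
--     "Odisha":               "odisha",
--     "Punjab":               "punjab",
--     "Rajasthan":            "rajasthan",
--     "Sikkim":               "sikkim",
--     "Tamil Nadu":           "tamil_nadu",
--     "Telangana":            "telangana",
--     "Tripura":              "tripura",
--     "Uttar Pradesh":        "uttar_pradesh",
--     "Uttarakhand":          "uttarakhand",
--     "West Bengal":          "west_bengal",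
--
--     # ── 8 Union Territories ──
--     "Andaman and Nicobar Islands": "andaman_nicobar",
--     "Andaman and Nicobar":  "andaman_nicobar",
--     "Chandigarh":           "chandigarh",
--     "Dadra and Nagar Haveli and Daman and Diu": "dadra_daman_diu",
--     "Daman and Diu":        "dadra_daman_diu",
--     "Dadra and Nagar Haveli": "dadra_daman_diu",
--     "Delhi":                "delhi",
--     "NCT of Delhi":         "delhi",
--     "New Delhi":            "delhi",
--     "Jammu and Kashmir":    "jammu_and_kashmir",
--     "Ladakh":               "ladakh",
--     "Lakshadweep":          "lakshadweep",
--     "Puducherry":           "puducherry",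
--     "Pondicherry":          "puducherry",
-- }
--
-- def get_state_key(state_name: str) -> str | None:
--     """Convert a state display name to its file-system key."""
--     if not state_name:
--         return None
--
--     # Exact match
--     if state_name in STATE_KEY_MAP:
--         return STATE_KEY_MAP[state_name]
--
--     # Case-insensitive match
--     lower = state_name.lower().strip()
--     for display, key in STATE_KEY_MAP.items():
--         if display.lower() == lower:
--             return key
--
--     # Partial match
--     for display, key in STATE_KEY_MAP.items():
--         if lower in display.lower() or display.lower() in lower:
--             return key
--
--     return None
-- ===== SOURCE B (Python) =====
-- STATE_KEY_MAP: dict[str, str] = {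
--     "Andhra Pradesh":       "andhra_pradesh",
--     "Arunachal Pradesh":    "arunachal_pradesh",
--     "Assam":                "assam",
--     "Bihar":                "bihar",
--     "Chhattisgarh":         "chhattisgarh",
--     "Goa":                  "goa",
--     "Gujarat":              "gujarat",
--     "Haryana":              "haryana",
--     "Himachal Pradesh":     "himachal_pradesh",
--     "Jharkhand":            "jharkhand",
--     "Karnataka":            "karnataka",
--     "Kerala":               "kerala",
--     "Madhya Pradesh":       "madhya_pradesh",
--     "Maharashtra":          "maharashtra",
--     "Manipur":              "manipur",
--     "Meghalaya":            "meghalaya",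
--     "Mizoram":              "mizoram",
--     "Nagaland":             "nagaland",
--     "Odisha":               "odisha",
--     "Punjab":               "punjab",
--     "Rajasthan":            "rajasthan",
--     "Sikkim":               "sikkim",
--     "Tamil Nadu":           "tamil_nadu",
--     "Telangana":            "telangana",
--     "Tripura":              "tripura",
--     "Uttar Pradesh":        "uttar_pradesh",
--     "Uttarakhand":          "uttarakhand",
--     "West Bengal":          "west_bengal",
--     "Andaman and Nicobar Islands": "andaman_nicobar",
--     "Andaman and Nicobar":  "andaman_nicobar",
--     "Chandigarh":           "chandigarh",
--     "Dadra and Nagar Haveli and Daman and Diu": "dadra_daman_diu",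
--     "Daman and Diu":        "dadra_daman_diu",
--     "Dadra and Nagar Haveli": "dadra_daman_diu",
--     "Delhi":                "delhi",
--     "NCT of Delhi":         "delhi",
--     "New Delhi":            "delhi",
--     "Jammu and Kashmir":    "jammu_and_kashmir",
--     "Ladakh":               "ladakh",
--     "Lakshadweep":          "lakshadweep",
--     "Puducherry":           "puducherry",
--     "Pondicherry":          "puducherry",
-- }
--
-- def get_state_key(state_name: str) -> str | None:
--     """Single pass: rank every entry (0 exact, 1 case-insensitive, 2 partial)
--     and keep the first entry with the lowest rank."""
--     if not state_name:
--         return None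
--     lower = state_name.lower().strip()
--     best = None  # (priority, key)
--     for display, key in STATE_KEY_MAP.items():
--         dl = display.lower()
--         if display == state_name:
--             p = 0
--         elif dl == lower:
--             p = 1
--         elif lower in dl or dl in lower:
--             p = 2
--         else:
--             continue
--         if best is None or p < best[0]:
--             best = (p, key)
--     return best[1] if best is not None else None
-- ===== Notes on version B (the rewrite author's own statement) =====
-- stated objective: alternative
-- what changed: Replaces A's three sequential scans (exact dict lookup, case-insensitive loop, partial loop) with a single pass that ranks each entry 0/1/2 and keeps the first entry of lowest rank.
import Mathlib
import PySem

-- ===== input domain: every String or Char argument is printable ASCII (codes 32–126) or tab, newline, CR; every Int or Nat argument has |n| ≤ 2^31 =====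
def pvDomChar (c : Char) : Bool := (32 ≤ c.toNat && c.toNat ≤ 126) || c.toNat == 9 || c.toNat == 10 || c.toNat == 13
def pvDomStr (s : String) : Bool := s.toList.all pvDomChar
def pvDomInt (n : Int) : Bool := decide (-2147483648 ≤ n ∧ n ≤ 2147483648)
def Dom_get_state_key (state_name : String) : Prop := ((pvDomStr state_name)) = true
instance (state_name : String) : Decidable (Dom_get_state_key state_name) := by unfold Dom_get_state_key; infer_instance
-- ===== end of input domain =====

-- B replaces A's three sequential scans over the map with one pass that ranks
-- each entry (0 exact / 1 case-insensitive / 2 partial) and keeps the first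
-- entry of lowest rank; same results, a genuinely different traversal.


-- the module constant STATE_KEY_MAP (a dict literal; items in insertion order)
def stateKeyMap : List (String × String) := [
  ("Andhra Pradesh", "andhra_pradesh"),
  ("Arunachal Pradesh", "arunachal_pradesh"),
  ("Assam", "assam"),
  ("Bihar", "bihar"),
  ("Chhattisgarh", "chhattisgarh"),
  ("Goa", "goa"),
  ("Gujarat", "gujarat"),
  ("Haryana", "haryana"),
  ("Himachal Pradesh", "himachal_pradesh"),
  ("Jharkhand", "jharkhand"),
  ("Karnataka", "karnataka"),
  ("Kerala", "kerala"),
  ("Madhya Pradesh", "madhya_pradesh"),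
  ("Maharashtra", "maharashtra"),
  ("Manipur", "manipur"),
  ("Meghalaya", "meghalaya"),
  ("Mizoram", "mizoram"),
  ("Nagaland", "nagaland"),
  ("Odisha", "odisha"),
  ("Punjab", "punjab"),
  ("Rajasthan", "rajasthan"),
  ("Sikkim", "sikkim"),
  ("Tamil Nadu", "tamil_nadu"),
  ("Telangana", "telangana"),
  ("Tripura", "tripura"),
  ("Uttar Pradesh", "uttar_pradesh"),
  ("Uttarakhand", "uttarakhand"),
  ("West Bengal", "west_bengal"),
  ("Andaman and Nicobar Islands", "andaman_nicobar"),
  ("Andaman and Nicobar", "andaman_nicobar"),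
  ("Chandigarh", "chandigarh"),
  ("Dadra and Nagar Haveli and Daman and Diu", "dadra_daman_diu"),
  ("Daman and Diu", "dadra_daman_diu"),
  ("Dadra and Nagar Haveli", "dadra_daman_diu"),
  ("Delhi", "delhi"),
  ("NCT of Delhi", "delhi"),
  ("New Delhi", "delhi"),
  ("Jammu and Kashmir", "jammu_and_kashmir"),
  ("Ladakh", "ladakh"),
  ("Lakshadweep", "lakshadweep"),
  ("Puducherry", "puducherry"),
  ("Pondicherry", "puducherry")]

-- ===== PORT A =====
-- "for display, key in STATE_KEY_MAP.items(): if display.lower() == lower: return key"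
def aLoop1 : List (String × String) → String → Option String
  | [], _ => none
  | (d, k) :: t, lw => if PySem.Str.lower d == lw then some k else aLoop1 t lw

-- "for display, key in ...: if lower in display.lower() or display.lower() in lower: return key"
def aLoop2 : List (String × String) → String → Option String
  | [], _ => none
  | (d, k) :: t, lw =>
      if PySem.Str.isIn lw (PySem.Str.lower d) || PySem.Str.isIn (PySem.Str.lower d) lw
      then some k else aLoop2 t lw

def get_state_key (state_name : String) : Option String :=
  if state_name == "" then none
  else
    match (PySem.Dict.mk stateKeyMap).get? state_name with   -- exact match
    | some k => some k
    | none =>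
      let lower := PySem.Str.strip (PySem.Str.lower state_name)
      match aLoop1 stateKeyMap lower with                    -- case-insensitive
      | some k => some k
      | none => aLoop2 stateKeyMap lower                     -- partial

-- ===== PORT B =====
-- rank of one entry: 0 exact, 1 case-insensitive, 2 partial, none = skip
def bPrio (s lw d : String) : Option Nat :=
  let dl := PySem.Str.lower d
  if d == s then some 0
  else if dl == lw then some 1
  else if PySem.Str.isIn lw dl || PySem.Str.isIn dl lw then some 2
  else none

-- "if best is None or p < best[0]: best = (p, key)"
def bStep (s lw : String) (best : Option (Nat × String)) (e : String × String) :
    Option (Nat × String) :=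
  match bPrio s lw e.1 with
  | none => best
  | some p =>
    match best with
    | none => some (p, e.2)
    | some b => if p < b.1 then some (p, e.2) else best

def get_state_key_alt (state_name : String) : Option String :=
  if state_name == "" then none
  else
    let lower := PySem.Str.strip (PySem.Str.lower state_name)
    match stateKeyMap.foldl (bStep state_name lower) none with
    | some b => some b.2
    | none => none

-- ===== PRECONDITION & SPEC =====
def Spec_get_state_key (state_name : String) (out : Option String) : Prop := out = get_state_key_alt state_name
instance (state_name : String) (out : Option String) : Decidable (Spec_get_state_key state_name out) := by unfold Spec_get_state_key; infer_instance

-- ===== CLAIM (what is proved, stated in full; the proofs are below) =====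
def Claim_equal_get_state_key : Prop := ∀ (state_name : String), Dom_get_state_key state_name → Spec_get_state_key state_name (get_state_key state_name)

-- ===== LEMMAS AND PROOFS =====

-- abstract "update the best entry" step, parameterised by the rank of the current entry
def pstep (po : Option Nat) (k : String) (best : Option (Nat × String)) : Option (Nat × String) :=
  match po with
  | none => best
  | some p =>
    match best with
    | none => some (p, k)
    | some b => if p < b.1 then some (p, k) else best

-- prefer the strictly better of an earlier best `b` and a later best `c`, ties to `b`
def pmerge (b c : Option (Nat × String)) : Option (Nat × String) :=
  match b, c with
  | none, c => c
  | b, none => b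
  | some b', some c' => if c'.1 < b'.1 then some c' else some b'

-- the staged three-scan result, at the (rank, key) level
def stagedS (g0 g1 g2 : String × String → Bool) (L : List (String × String)) :
    Option (Nat × String) :=
  match L.find? g0 with
  | some e => some (0, e.2)
  | none =>
    match L.find? g1 with
    | some e => some (1, e.2)
    | none =>
      match L.find? g2 with
      | some e => some (2, e.2)
      | none => none

def prioG (g0 g1 g2 : String × String → Bool) (e : String × String) : Option Nat :=
  if g0 e then some 0 else if g1 e then some 1 else if g2 e then some 2 else none

lemma step_merge (po : Option Nat) (k : String) (b c : Option (Nat × String)) :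
    pmerge (pstep po k b) c = pmerge b (pmerge (pstep po k none) c) := by
  cases po with
  | none => cases b <;> cases c <;> simp [pstep, pmerge]
  | some p =>
    cases b with
    | none => cases c <;> simp [pstep, pmerge]
    | some b' =>
      cases c with
      | none => simp only [pstep, pmerge]; split_ifs <;> rfl
      | some c' =>
        simp only [pstep, pmerge]
        split_ifs <;> simp only [pmerge] <;> split_ifs <;> first | rfl | omega

lemma foldl_pstep_merge (P : String × String → Option Nat) :
    ∀ (L : List (String × String)) (b : Option (Nat × String)),
      L.foldl (fun b e => pstep (P e) e.2 b) b
        = pmerge b (L.foldl (fun b e => pstep (P e) e.2 b) none) := by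
  intro L
  induction L with
  | nil => intro b; cases b <;> simp [pmerge]
  | cons e t ih =>
    intro b
    simp only [List.foldl_cons]
    rw [ih (pstep (P e) e.2 b), ih (pstep (P e) e.2 none), step_merge]

lemma foldl_prioG_eq_staged (g0 g1 g2 : String × String → Bool) :
    ∀ (L : List (String × String)),
      L.foldl (fun b e => pstep (prioG g0 g1 g2 e) e.2 b) none = stagedS g0 g1 g2 L := by
  intro L
  induction L with
  | nil => rfl
  | cons e t ih =>
    simp only [List.foldl_cons]
    rw [foldl_pstep_merge, ih]
    rcases hf0 : t.find? g0 with _ | u0 <;>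
    rcases hf1 : t.find? g1 with _ | u1 <;>
    rcases hf2 : t.find? g2 with _ | u2 <;>
      by_cases h0 : g0 e <;> by_cases h1 : g1 e <;> by_cases h2 : g2 e <;>
      simp [stagedS, prioG, pstep, pmerge, List.find?, h0, h1, h2, hf0, hf1, hf2]

lemma dict_mk_get? (s : String) :
    ∀ (L : List (String × String)),
      (PySem.Dict.mk L).get? s = (L.find? (fun e => e.1 == s)).map (fun e => e.2) := by
  intro L
  induction L with
  | nil => rfl
  | cons e t ih =>
    rw [show (e :: t) = ((e.1, e.2) :: t) by rfl, PySem.Dict.get?_mk_cons]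
    by_cases h : e.1 == s <;> simp [List.find?, h, ih]

lemma aLoop1_eq_find (lw : String) :
    ∀ (L : List (String × String)),
      aLoop1 L lw = (L.find? (fun e => PySem.Str.lower e.1 == lw)).map (fun e => e.2) := by
  intro L
  induction L with
  | nil => rfl
  | cons e t ih =>
    rcases e with ⟨d, k⟩
    by_cases h : PySem.Str.lower d == lw <;> simp [aLoop1, List.find?, h, ih]

lemma aLoop2_eq_find (lw : String) :
    ∀ (L : List (String × String)),
      aLoop2 L lw
        = (L.find? (fun e => PySem.Str.isIn lw (PySem.Str.lower e.1)
            || PySem.Str.isIn (PySem.Str.lower e.1) lw)).map (fun e => e.2) := by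
  intro L
  induction L with
  | nil => rfl
  | cons e t ih =>
    rcases e with ⟨d, k⟩
    cases h : PySem.Str.isIn lw (PySem.Str.lower d) || PySem.Str.isIn (PySem.Str.lower d) lw <;>
      simp only [aLoop2, List.find?, h, ih, if_true, if_false, Bool.false_eq_true,
        Option.map_some, reduceIte]

lemma bStep_eq_pstep (s lw : String) :
    bStep s lw = fun b e =>
      pstep (prioG (fun e => e.1 == s) (fun e => PySem.Str.lower e.1 == lw)
        (fun e => PySem.Str.isIn lw (PySem.Str.lower e.1)
          || PySem.Str.isIn (PySem.Str.lower e.1) lw) e) e.2 b := by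
  funext b e
  simp only [bStep, bPrio, pstep, prioG]

-- ===== VERDICT (by name: the statement is the Claim_ definition above) =====
theorem get_state_key_spec : Claim_equal_get_state_key := by
  intro s _
  unfold Spec_get_state_key get_state_key get_state_key_alt
  by_cases hs : s == ""
  · simp [hs]
  · simp only [hs, if_false, Bool.false_eq_true]
    rw [bStep_eq_pstep, foldl_prioG_eq_staged, dict_mk_get?,
      aLoop1_eq_find, aLoop2_eq_find]
    set lw := PySem.Str.strip (PySem.Str.lower s)
    rcases hf0 : stateKeyMap.find? (fun e => e.1 == s) with _ | u0 <;>
    rcases hf1 : stateKeyMap.find? (fun e => PySem.Str.lower e.1 == lw) with _ | u1 <;>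
    rcases hf2 : stateKeyMap.find? (fun e => PySem.Str.isIn lw (PySem.Str.lower e.1)
        || PySem.Str.isIn (PySem.Str.lower e.1) lw) with _ | u2 <;>
      simp only [stagedS, hf0, hf1, hf2, Option.map_some, Option.map_none]
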